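-- pv_equiv track=rewrite | github.com/youdame/algorithm | 백준/Gold/17140. 이차원 배열과 연산/이차원 배열과 연산.py | make_new_arr
-- ===== SOURCE A (Python) =====
-- from collections import defaultdict
--
-- def make_new_arr(arr , method):
--     if method == "C":
--         arr = list(map(list, zip(*arr)))
--
--     n = len(arr)
--     m = len(arr[0])
--
--     max_length = 0
--
--     new_arr = []
--     for j in range(n):
--         new_row_dict = defaultdict(int)
--         new_row = []
--
--         for k in range(m):
--             if arr[j][k] != 0:
--                 new_row_dict[arr[j][k]] += 1
--
--         temp_row = list(sorted(new_row_dict.items(),key=lambda x : (x[1], x[0])))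
--
--         for num, count in temp_row:
--             new_row.extend([num, count])
--             new_row = new_row[:100]
--
--         max_length = max(max_length, len(new_row))
--
--         new_arr.append(new_row)
--
--     for row in new_arr:
--         if len(row) < max_length:
--             row.extend([0] * (max_length - len(row)))
--
--
--     if method == "C":
--         new_arr = list(map(list, zip(*new_arr)))
--
--     return new_arr
-- ===== SOURCE B (Python) =====
-- def _run_len(xs, v):
--     # length of the prefix of xs equal to v
--     k = 0
--     while k < len(xs) and xs[k] == v:
--         k += 1
--     return k
--
--
-- def _rle(xs):
--     # run-length encode xs into (value, count) pairs
--     pairs = []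
--     while xs:
--         k = _run_len(xs[1:], xs[0]) + 1
--         pairs.append((xs[0], k))
--         xs = xs[k:]
--     return pairs
--
--
-- def _row_transform(vals):
--     vals = sorted(v for v in vals if v != 0)
--     pairs = _rle(vals)
--     pairs.sort(key=lambda p: p[1])  # stable: value order breaks count ties
--     out = []
--     for v, c in pairs:
--         out.append(v)
--         out.append(c)
--     return out[:100]
--
--
-- def make_new_arr(arr, method):
--     if method == "C":
--         arr = [list(col) for col in zip(*arr)]
--     m = len(arr[0])
--     rows = [_row_transform(row[:m]) for row in arr]
--     width = max(len(r) for r in rows)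
--     rows = [r + [0] * (width - len(r)) for r in rows]
--     if method == "C":
--         rows = [list(col) for col in zip(*rows)]
--     return rows
-- ===== Notes on version B (the rewrite author's own statement) =====
-- stated objective: alternative
-- what changed: Per row, instead of counting nonzero values into a defaultdict and sorting its items by (count, value), B sorts the nonzero values, run-length-encodes the sorted list into (value, count) pairs, and stable-sorts those pairs by count alone (sort stability supplies the value tiebreak); truncation to 100 is one final slice instead of a slice per pair.
import Mathlib
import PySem

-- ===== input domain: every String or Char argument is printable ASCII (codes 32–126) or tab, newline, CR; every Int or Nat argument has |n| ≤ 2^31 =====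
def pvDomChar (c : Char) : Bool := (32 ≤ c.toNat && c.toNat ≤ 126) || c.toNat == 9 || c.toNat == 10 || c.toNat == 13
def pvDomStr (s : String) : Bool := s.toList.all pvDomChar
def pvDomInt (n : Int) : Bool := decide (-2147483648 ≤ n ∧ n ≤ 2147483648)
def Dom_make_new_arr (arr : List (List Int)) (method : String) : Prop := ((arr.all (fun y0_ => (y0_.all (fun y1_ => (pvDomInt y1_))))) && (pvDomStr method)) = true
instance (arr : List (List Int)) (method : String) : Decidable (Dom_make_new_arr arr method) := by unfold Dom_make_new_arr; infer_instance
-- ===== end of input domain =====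

-- B re-groups each row by sorting its nonzero values, run-length encoding, and a stable sort by count
-- (instead of A's defaultdict + sort of items by (count, value)); return values proved equal on Pre_.

-- ===== PORT A =====
-- shared helper: Python's zip(*arr) (as lists); both A and B transpose with the same builtin
def pyZipT (arr : List (List Int)) : List (List Int) :=
  match arr with
  | [] => []
  | a :: rest =>
    (List.range ((rest.map List.length).foldl min a.length)).map
      (fun i => (a :: rest).map (fun r => r.getD i 0))

def make_new_arr (arr : List (List Int)) (method : String) : List (List Int) :=
  let arr1 := if method = "C" then pyZipT arr else arr
  let n := PySem.List.len arr1
  let m := PySem.List.len (arr1.headD [])  -- arr[0]; Pre_ excludes the empty-list IndexError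
  -- row loop, carrying (new_arr, max_length); arr[j][k] is in range under Pre_, so pyGetD is exact there
  let res := (PySem.List.pyRange 0 n).foldl
    (fun (acc : List (List Int) × Int) j =>
      let row := PySem.List.pyGetD arr1 j []
      let d := (PySem.List.pyRange 0 m).foldl
        (fun d k =>
          if PySem.List.pyGetD row k 0 ≠ 0 then
            d.modify (PySem.List.pyGetD row k 0) (0 : Int) (· + 1)
          else d)
        PySem.Dict.empty
      let temp := PySem.List.sorted2 d.items (fun p => p.2) (fun p => p.1)
      let nr := temp.foldl (fun r p => PySem.List.slice (r ++ [p.1, p.2]) none (some 100)) []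
      (acc.1 ++ [nr], max acc.2 (PySem.List.len nr)))
    ([], 0)
  -- in-place row.extend padding, ported as a map over the rows
  let padded := res.1.map (fun row =>
    if PySem.List.len row < res.2 then row ++ PySem.List.pyRepeat [0] (res.2 - PySem.List.len row)
    else row)
  if method = "C" then pyZipT padded else padded

-- ===== PORT B =====
-- _run_len: length of the prefix of xs equal to v (Python returns an int; the value is a Nat)
def runLen (xs : List Int) (v : Int) : Nat :=
  match xs with
  | [] => 0
  | x :: t => if x == v then runLen t v + 1 else 0

-- _rle: run-length encoding, peeling one run per step exactly as Source B's while loop does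
def rle (xs : List Int) : List (Int × Int) :=
  match xs with
  | [] => []
  | x :: t =>
    (x, ((runLen t x + 1 : Nat) : Int)) :: rle (t.drop (runLen t x))
termination_by xs.length
decreasing_by simp [List.length_drop]

def rowTransform (vals0 : List Int) : List Int :=
  let vals := PySem.List.sorted (vals0.filter (fun v => !(v == 0))) (fun x => x)
  let pairs := PySem.List.sorted (rle vals) (fun p => p.2)  -- stable sort by count
  let out := pairs.foldl (fun out p => (out ++ [p.1]) ++ [p.2]) []
  PySem.List.slice out none (some 100)

def make_new_arr_alt (arr : List (List Int)) (method : String) : List (List Int) :=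
  let arr1 := if method = "C" then pyZipT arr else arr
  let m := PySem.List.len (arr1.headD [])  -- arr[0]; Pre_ excludes the empty-list IndexError
  let rows := arr1.map (fun row => rowTransform (PySem.List.slice row none (some m)))
  -- max(len(r) for r in rows); ValueError on an empty arr only happens outside Pre_
  let width := (PySem.List.max? (rows.map PySem.List.len) (fun x => x)).getD 0
  let rows2 := rows.map (fun r => r ++ PySem.List.pyRepeat [0] (width - PySem.List.len r))
  if method = "C" then pyZipT rows2 else rows2

-- ===== PRECONDITION & SPEC =====
-- Pre_ excludes exactly the inputs where A raises: an empty arr (IndexError on arr[0]), a row emptied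
-- by the "C" transpose, or (other methods) a row shorter than row 0 (IndexError on arr[j][k]).
def Pre_make_new_arr (arr : List (List Int)) (method : String) : Prop :=
  arr ≠ [] ∧ (if method = "C" then ∀ r ∈ arr, r ≠ [] else ∀ r ∈ arr, (arr.headD []).length ≤ r.length)
instance (arr : List (List Int)) (method : String) : Decidable (Pre_make_new_arr arr method) := by
  unfold Pre_make_new_arr; infer_instance

def pvWitness_make_new_arr : List (List Int) × String := ([[1, 2], [0, 1]], "R")

def Spec_make_new_arr (arr : List (List Int)) (method : String) (out : List (List Int)) : Prop := out = make_new_arr_alt arr method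
instance (arr : List (List Int)) (method : String) (out : List (List Int)) : Decidable (Spec_make_new_arr arr method out) := by unfold Spec_make_new_arr; infer_instance

-- ===== CLAIM (what is proved, stated in full; the proofs are below) =====
def Claim_equal_make_new_arr : Prop := ∀ (arr : List (List Int)) (method : String), Dom_make_new_arr arr method → Pre_make_new_arr arr method → Spec_make_new_arr arr method (make_new_arr arr method)

-- ===== LEMMAS AND PROOFS =====

-- A's per-row computation as a function of the row (proof-side helper)
def rowA (m : Nat) (row : List Int) : List Int :=
  let d := (PySem.List.pyRange 0 (m : Int)).foldl
    (fun d k =>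
      if PySem.List.pyGetD row k 0 ≠ 0 then
        d.modify (PySem.List.pyGetD row k 0) (0 : Int) (· + 1)
      else d)
    PySem.Dict.empty
  let temp := PySem.List.sorted2 d.items (fun p => p.2) (fun p => p.1)
  temp.foldl (fun r p => PySem.List.slice (r ++ [p.1, p.2]) none (some 100)) []

def nrow (a : List (List Int)) (j : Int) : List Int :=
  rowA (a.headD []).length (PySem.List.pyGetD a j [])

-- the middle pipelines of the two ports, factored out for the proof
def coreA (a : List (List Int)) : List (List Int) :=
  let res := (PySem.List.pyRange 0 (PySem.List.len a)).foldl
    (fun (acc : List (List Int) × Int) j =>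
      (acc.1 ++ [nrow a j], max acc.2 (PySem.List.len (nrow a j))))
    ([], 0)
  res.1.map (fun row =>
    if PySem.List.len row < res.2 then row ++ PySem.List.pyRepeat [0] (res.2 - PySem.List.len row)
    else row)

def coreB (a : List (List Int)) : List (List Int) :=
  let m := PySem.List.len (a.headD [])
  let rows := a.map (fun row => rowTransform (PySem.List.slice row none (some m)))
  let width := (PySem.List.max? (rows.map PySem.List.len) (fun x => x)).getD 0
  rows.map (fun r => r ++ PySem.List.pyRepeat [0] (width - PySem.List.len r))

-- ---------- the dict loop is a Counter of the filtered row prefix ----------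

lemma map_getD_range (row : List Int) (m : Nat) :
    (List.range m).map (fun k => row.getD k 0) = row.take m ++ List.replicate (m - row.length) 0 := by
  induction m with
  | zero => simp
  | succ m ih =>
    rw [List.range_succ, List.map_append, ih]
    by_cases h : m < row.length
    · have h1 : m + 1 - row.length = 0 := by omega
      have h2 : m - row.length = 0 := by omega
      have h5 : row[m]? = some row[m] := List.getElem?_eq_getElem h
      rw [h2, h1]
      simp only [List.replicate_zero, List.append_nil, List.map_singleton]
      rw [List.take_add_one, List.getD_eq_getElem?_getD, h5]
      rfl
    · have h2 : row.take m = row := List.take_of_length_le (by omega)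
      have h3 : row.take (m + 1) = row := List.take_of_length_le (by omega)
      have h4 : m + 1 - row.length = (m - row.length) + 1 := by omega
      have h5 : row[m]? = none := List.getElem?_eq_none (by omega)
      simp [h2, h3, h4, List.getD, h5, List.replicate_succ']

lemma vals_lemma (m : Nat) (row : List Int) :
    (PySem.List.pyRange 0 (m : Int)).foldl
      (fun d k =>
        if PySem.List.pyGetD row k 0 ≠ 0 then
          d.modify (PySem.List.pyGetD row k 0) (0 : Int) (· + 1)
        else d)
      PySem.Dict.empty
    = PySem.Dict.counter ((row.take m).filter (fun v => !(v == 0))) := by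
  rw [PySem.List.foldl_ite_eq_foldl_filter (p := fun k => PySem.List.pyGetD row k 0 ≠ 0)]
  have hfm := List.foldl_map (f := fun k => PySem.List.pyGetD row k 0)
    (g := fun (d : PySem.Dict Int Int) v => d.modify v 0 (· + 1))
    (l := (PySem.List.pyRange 0 (m : Int)).filter (fun k => decide (PySem.List.pyGetD row k 0 ≠ 0)))
    (init := PySem.Dict.empty)
  rw [← hfm]
  have hlist : ((PySem.List.pyRange 0 (m : Int)).filter
        (fun k => decide (PySem.List.pyGetD row k 0 ≠ 0))).map (fun k => PySem.List.pyGetD row k 0)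
      = (row.take m).filter (fun v => !(v == 0)) := by
    have hq : (fun k => decide (PySem.List.pyGetD row k 0 ≠ 0))
        = ((fun v => decide (v ≠ 0)) ∘ (fun k => PySem.List.pyGetD row k 0)) := rfl
    rw [hq, ← List.filter_map]
    have hmap : (PySem.List.pyRange 0 (m : Int)).map (fun k => PySem.List.pyGetD row k 0)
        = row.take m ++ List.replicate (m - row.length) 0 := by
      rw [PySem.List.pyRange_zero_natCast, List.map_map, ← map_getD_range row m]
      exact List.map_congr_left (fun k _ => by simp [PySem.List.pyGetD_natCast])
    rw [hmap, List.filter_append]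
    have hrep : (List.replicate (m - row.length) (0 : Int)).filter (fun v => decide (v ≠ 0)) = [] := by
      simp
    rw [hrep, List.append_nil]
    exact List.filter_congr (fun v _ => by by_cases h : v = 0 <;> simp [h])
  rw [hlist, PySem.Dict.counter_eq_foldl]

-- ---------- runLen / run structure of a sorted list ----------

lemma runLen_eq_count (x : Int) :
    ∀ (t : List Int), t.Pairwise (· ≤ ·) → (∀ y ∈ t, x ≤ y) → runLen t x = t.count x := by
  intro t
  induction t with
  | nil => intro _ _; simp [runLen]
  | cons y t ih =>
    intro hp hle
    obtain ⟨hy, hp'⟩ := List.pairwise_cons.mp hp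
    by_cases hxy : y = x
    · subst hxy
      rw [List.count_cons_self]
      simp only [runLen, BEq.rfl, if_true]
      rw [ih hp' (fun z hz => hle z (List.mem_cons_of_mem _ hz))]
    · have hx : x < y := lt_of_le_of_ne (hle y List.mem_cons_self) (fun h => hxy h.symm)
      have hnot : x ∉ y :: t := by
        intro hmem
        rcases List.mem_cons.mp hmem with h | h
        · omega
        · have := hy x h; omega
      rw [List.count_eq_zero.mpr hnot]
      simp [runLen, show (y == x) = false from beq_eq_false_iff_ne.mpr hxy]

lemma take_count_replicate (x : Int) :
    ∀ (t : List Int), t.Pairwise (· ≤ ·) → (∀ y ∈ t, x ≤ y) →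
      t.take (t.count x) = List.replicate (t.count x) x := by
  intro t
  induction t with
  | nil => intro _ _; simp
  | cons y t ih =>
    intro hp hle
    obtain ⟨hy, hp'⟩ := List.pairwise_cons.mp hp
    by_cases hxy : y = x
    · subst hxy
      rw [List.count_cons_self, List.take_succ_cons, List.replicate_succ,
        ih hp' (fun z hz => hle z (List.mem_cons_of_mem _ hz))]
    · have hx : x < y := lt_of_le_of_ne (hle y List.mem_cons_self) (fun h => hxy h.symm)
      have hnot : x ∉ y :: t := by
        intro hmem
        rcases List.mem_cons.mp hmem with h | h
        · omega
        · have := hy x h; omega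
      rw [List.count_eq_zero.mpr hnot]
      simp

lemma sorted_run_decomp (x : Int) (t : List Int) (hp : t.Pairwise (· ≤ ·))
    (hle : ∀ y ∈ t, x ≤ y) :
    t = List.replicate (t.count x) x ++ t.drop (t.count x) := by
  conv_lhs => rw [← List.take_append_drop (t.count x) t]
  rw [take_count_replicate x t hp hle]

lemma drop_count_gt (x : Int) (t : List Int) (hp : t.Pairwise (· ≤ ·))
    (hle : ∀ y ∈ t, x ≤ y) : ∀ y ∈ t.drop (t.count x), x < y := by
  intro y hy
  have hyt : y ∈ t := List.mem_of_mem_drop hy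
  have hxy : x ≤ y := hle y hyt
  rcases eq_or_lt_of_le hxy with h | h
  · exfalso
    subst h
    have hd := sorted_run_decomp x t hp hle
    have hc : t.count x = (List.replicate (t.count x) x).count x + (t.drop (t.count x)).count x := by
      conv_lhs => rw [hd]
      rw [List.count_append]
    rw [List.count_replicate_self] at hc
    have h0 : (t.drop (t.count x)).count x = 0 := by omega
    exact (List.count_eq_zero.mp h0) hy
  · exact h

lemma drop_count_count (x k : Int) (hk : k ≠ x) (t : List Int) (hp : t.Pairwise (· ≤ ·))
    (hle : ∀ y ∈ t, x ≤ y) : (t.drop (t.count x)).count k = t.count k := by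
  conv_rhs => rw [sorted_run_decomp x t hp hle]
  rw [List.count_append]
  have hxk : x ≠ k := fun h => hk h.symm
  simp [List.count_replicate, hxk]

-- ---------- rle of a sorted list ----------

theorem rle_sorted_spec : ∀ (L : List Int), L.Pairwise (· ≤ ·) →
    rle L = ((rle L).map (·.1)).map (fun k => (k, (L.count k : Int)))
    ∧ List.Pairwise (· < ·) ((rle L).map (·.1))
    ∧ (∀ k, k ∈ (rle L).map (·.1) ↔ k ∈ L)
  | [], _ => by simp [rle]
  | x :: t, hp => by
    obtain ⟨hle, hpt⟩ := List.pairwise_cons.mp hp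
    have hrun : runLen t x = t.count x := runLen_eq_count x t hpt hle
    have hRp : (t.drop (t.count x)).Pairwise (· ≤ ·) := hpt.drop
    have hRgt : ∀ y ∈ t.drop (t.count x), x < y := drop_count_gt x t hpt hle
    obtain ⟨ih1, ih2, ih3⟩ := rle_sorted_spec (t.drop (t.count x)) hRp
    have heq : rle (x :: t) = (x, ((t.count x + 1 : Nat) : Int)) :: rle (t.drop (t.count x)) := by
      rw [rle, hrun]
    have hmemR : ∀ k ∈ (rle (t.drop (t.count x))).map (·.1), x < k :=
      fun k hk => hRgt k ((ih3 k).mp hk)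
    have hkxne : ∀ k ∈ (rle (t.drop (t.count x))).map (·.1), k ≠ x :=
      fun k hk => by have := hmemR k hk; omega
    refine ⟨?_, ?_, ?_⟩
    · rw [heq, List.map_cons, List.map_cons]
      congr 1
      · rw [List.count_cons_self]
      · have htail : ((rle (t.drop (t.count x))).map (·.1)).map
              (fun k => (k, ((x :: t).count k : Int)))
            = ((rle (t.drop (t.count x))).map (·.1)).map
              (fun k => (k, ((t.drop (t.count x)).count k : Int))) := by
          apply List.map_congr_left
          intro k hk
          rw [List.count_cons_of_ne (Ne.symm (hkxne k hk)), drop_count_count x k (hkxne k hk) t hpt hle]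
        rw [htail]
        exact ih1
    · rw [heq, List.map_cons, List.pairwise_cons]
      exact ⟨hmemR, ih2⟩
    · intro k
      rw [heq, List.map_cons, List.mem_cons, List.mem_cons]
      constructor
      · rintro (h | h)
        · exact Or.inl h
        · exact Or.inr (List.mem_of_mem_drop ((ih3 k).mp h))
      · rintro (h | h)
        · exact Or.inl h
        · by_cases hkx : k = x
          · exact Or.inl hkx
          · refine Or.inr ((ih3 k).mpr ?_)
            have hd := sorted_run_decomp x t hpt hle
            rw [hd] at h
            rcases List.mem_append.mp h with h' | h'
            · exact absurd (List.eq_of_mem_replicate h') hkx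
            · exact h'
termination_by L => L.length
decreasing_by simp [List.length_drop]

-- ---------- stability: sorting by count only, on a list with increasing values ----------

lemma insertBy_congr {α : Type} (f g : α → α → Bool) (x : α) :
    ∀ (ys : List α), (∀ y ∈ ys, f x y = g x y) →
      PySem.List.insertBy f x ys = PySem.List.insertBy g x ys := by
  intro ys
  induction ys with
  | nil => intro _; rfl
  | cons y t ih =>
    intro h
    simp only [PySem.List.insertBy]
    rw [h y List.mem_cons_self]
    split
    · rfl
    · rw [ih (fun z hz => h z (List.mem_cons_of_mem _ hz))]

lemma stable_foldl_aux :
    ∀ (L acc : List (Int × Int)),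
      (∀ y ∈ acc, ∀ z ∈ L, y.1 < z.1) → L.Pairwise (fun a b => a.1 < b.1) →
      L.foldl (fun acc x => PySem.List.insertBy (fun a b => decide (a.2 < b.2)) x acc) acc
      = L.foldl (fun acc x =>
          PySem.List.insertBy (fun a b => decide (toLex (a.2, a.1) < toLex (b.2, b.1))) x acc) acc := by
  intro L
  induction L with
  | nil => intro acc _ _; rfl
  | cons x t ih =>
    intro acc hacc hp
    obtain ⟨hx, hpt⟩ := List.pairwise_cons.mp hp
    simp only [List.foldl_cons]
    have hins : PySem.List.insertBy (fun a b => decide (a.2 < b.2)) x acc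
        = PySem.List.insertBy (fun a b => decide (toLex (a.2, a.1) < toLex (b.2, b.1))) x acc := by
      apply insertBy_congr
      intro y hy
      have hlt : y.1 < x.1 := hacc y hy x List.mem_cons_self
      rw [Bool.eq_iff_iff]
      simp only [decide_eq_true_eq, Prod.Lex.lt_iff, ofLex_toLex]
      constructor
      · intro h; exact Or.inl h
      · rintro (h | ⟨_, h⟩)
        · exact h
        · omega
    rw [hins]
    apply ih
    · intro y hy z hz
      rcases (PySem.List.mem_insertBy _ _ _ _).mp hy with h | h
      · subst h; exact hx z hz
      · exact hacc y h z (List.mem_cons_of_mem _ hz)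
    · exact hpt

lemma sorted_snd_eq_sorted_lex (L : List (Int × Int)) (h : L.Pairwise (fun a b => a.1 < b.1)) :
    PySem.List.sorted L (fun p => p.2)
    = PySem.List.sorted L (fun p => toLex (p.2, p.1)) := by
  rw [PySem.List.sorted_eq_foldl_insertBy, PySem.List.sorted_eq_foldl_insertBy]
  exact stable_foldl_aux L [] (by simp) h

lemma sorted2_eq_sorted_lex (xs : List (Int × Int)) (k1 k2 : (Int × Int) → Int) :
    PySem.List.sorted2 xs k1 k2 = PySem.List.sorted xs (fun a => toLex (k1 a, k2 a)) := by
  unfold PySem.List.sorted2 PySem.List.sorted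
  simp only [if_neg (by decide : ¬ (false = true))]
  have hbef : (fun (a b : Int × Int) =>
        decide (k1 a < k1 b) || (!decide (k1 b < k1 a) && decide (k2 a < k2 b)))
      = fun a b => decide (toLex (k1 a, k2 a) < toLex (k1 b, k2 b)) := by
    funext a b
    rw [Bool.eq_iff_iff]
    simp only [Bool.or_eq_true, Bool.and_eq_true, Bool.not_eq_true', decide_eq_true_eq,
      decide_eq_false_iff_not, Prod.Lex.lt_iff, ofLex_toLex]
    omega
  rw [hbef]

-- ---------- the two pair lists are the same ----------

lemma pairs_eq (vals : List Int) :
    PySem.List.sorted2 ((PySem.Dict.counter vals).items) (fun p => p.2) (fun p => p.1)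
    = PySem.List.sorted (rle (PySem.List.sorted vals (fun x => x))) (fun p => p.2) := by
  have hLp : (PySem.List.sorted vals (fun x => x)).Pairwise (· ≤ ·) := by
    simpa using PySem.List.sorted_pairwise vals (fun x => x)
  obtain ⟨hshape, hpwF, hmemF⟩ := rle_sorted_spec (PySem.List.sorted vals (fun x => x)) hLp
  have hcnt : ∀ k : Int, (PySem.List.sorted vals (fun x => x)).count k = vals.count k :=
    fun k => (PySem.List.sorted_perm vals (fun x => x) false).count_eq k
  have hshape' : rle (PySem.List.sorted vals (fun x => x))
      = ((rle (PySem.List.sorted vals (fun x => x))).map (·.1)).map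
          (fun k => (k, (vals.count k : Int))) :=
    calc rle (PySem.List.sorted vals (fun x => x))
        = ((rle (PySem.List.sorted vals (fun x => x))).map (·.1)).map
            (fun k => (k, ((PySem.List.sorted vals (fun x => x)).count k : Int))) := hshape
      _ = ((rle (PySem.List.sorted vals (fun x => x))).map (·.1)).map
            (fun k => (k, (vals.count k : Int))) :=
          List.map_congr_left (fun k _ => by rw [hcnt k])
  have hFnodup : ((rle (PySem.List.sorted vals (fun x => x))).map (·.1)).Nodup :=
    hpwF.imp (fun h => ne_of_lt h)
  have hperm : ((rle (PySem.List.sorted vals (fun x => x))).map (·.1)).Perm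
      (PySem.Set.ofList vals) := by
    rw [List.perm_ext_iff_of_nodup hFnodup (PySem.Set.nodup_ofList vals)]
    intro k
    rw [hmemF k, PySem.Set.mem_ofList, PySem.List.mem_sorted]
  have hperm2 : (rle (PySem.List.sorted vals (fun x => x))).Perm
      ((PySem.Set.ofList vals).map (fun k => (k, (vals.count k : Int)))) := by
    conv_lhs => rw [hshape']
    exact hperm.map _
  have hpw1 : (rle (PySem.List.sorted vals (fun x => x))).Pairwise (fun a b => a.1 < b.1) := by
    rw [← List.pairwise_map (f := fun p : Int × Int => p.1)]
    exact hpwF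
  have hinj : Function.Injective (fun p : Int × Int => toLex (p.2, p.1)) := by
    intro a b h
    have h2 := toLex.injective h
    rw [Prod.mk.injEq] at h2
    exact Prod.ext h2.2 h2.1
  rw [PySem.Dict.items_counter, sorted2_eq_sorted_lex, sorted_snd_eq_sorted_lex _ hpw1]
  exact (PySem.List.sorted_eq_sorted_of_perm _ _ _ hinj hperm2).symm

-- ---------- truncation to 100 ----------

lemma slice100 (xs : List Int) : PySem.List.slice xs none (some 100) = xs.take 100 := by
  simpa using PySem.List.slice_to_natCast xs 100

lemma take100_app (X Y : List Int) : ((X.take 100) ++ Y).take 100 = (X ++ Y).take 100 := by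
  rw [List.take_append, List.take_append, List.take_take]
  simp only [List.length_take, Nat.min_self]
  congr 2
  omega

lemma trunc_foldl (ps : List (Int × Int)) :
    ∀ (r : List Int), r.length ≤ 100 →
      ps.foldl (fun r p => (r ++ [p.1, p.2]).take 100) r
      = (r ++ ps.flatMap (fun p => [p.1, p.2])).take 100 := by
  induction ps with
  | nil => intro r hr; simp [List.take_of_length_le hr]
  | cons p t ih =>
    intro r hr
    simp only [List.foldl_cons, List.flatMap_cons]
    rw [ih _ (by simp), take100_app, List.append_assoc]

lemma trunc_eq (ps : List (Int × Int)) :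
    ps.foldl (fun r p => PySem.List.slice (r ++ [p.1, p.2]) none (some 100)) []
    = PySem.List.slice (ps.foldl (fun out p => (out ++ [p.1]) ++ [p.2]) []) none (some 100) := by
  have h1 : ps.foldl (fun r p => PySem.List.slice (r ++ [p.1, p.2]) none (some 100)) []
      = ps.foldl (fun r p => (r ++ [p.1, p.2]).take 100) [] := by
    apply PySem.List.foldl_congr_mem
    intro acc x _
    rw [slice100]
  have h2 : ps.foldl (fun out p => (out ++ [p.1]) ++ [p.2]) []
      = ps.foldl (fun out p => out ++ [p.1, p.2]) [] := by
    apply PySem.List.foldl_congr_mem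
    intro acc x _
    rw [List.append_assoc]
    rfl
  rw [h1, h2, slice100, trunc_foldl ps [] (by simp), PySem.List.foldl_append_eq_flatMap]

-- ---------- per-row equality ----------

lemma core_row_eq (m : Nat) (row : List Int) :
    rowA m row = rowTransform (PySem.List.slice row none (some (m : Int))) := by
  unfold rowA rowTransform
  simp only []
  rw [vals_lemma, PySem.List.slice_to_natCast, pairs_eq, trunc_eq]

-- ---------- the outer pipeline ----------

lemma coreA_rows (a : List (List Int)) :
    coreA a =
      (a.map (rowA (a.headD []).length)).map
        (fun row =>
          if PySem.List.len row < ((a.map (rowA (a.headD []).length)).map PySem.List.len).foldl max 0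
          then row ++ PySem.List.pyRepeat [0]
            (((a.map (rowA (a.headD []).length)).map PySem.List.len).foldl max 0 - PySem.List.len row)
          else row) := by
  unfold coreA
  rw [PySem.List.foldl_prod_mk (f := fun l j => l ++ [nrow a j])
    (g := fun x j => max x (PySem.List.len (nrow a j)))]
  have hmap : (PySem.List.pyRange 0 (PySem.List.len a)).map (nrow a)
      = a.map (rowA (a.headD []).length) := by
    unfold nrow
    rw [show (fun j => rowA (a.headD []).length (PySem.List.pyGetD a j []))
        = (rowA (a.headD []).length) ∘ (fun j => PySem.List.pyGetD a j []) from rfl]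
    rw [← List.map_map, PySem.List.map_pyGetD_pyRange_zero]
  rw [PySem.List.foldl_append_singleton_eq_map, List.nil_append]
  have hfold : (PySem.List.pyRange 0 (PySem.List.len a)).foldl
      (fun x j => max x (PySem.List.len (nrow a j))) 0
      = ((a.map (rowA (a.headD []).length)).map PySem.List.len).foldl max 0 := by
    rw [← hmap, List.map_map, List.foldl_map]
    rfl
  rw [hmap, hfold]

lemma core_eq (a : List (List Int)) : coreA a = coreB a := by
  rw [coreA_rows]
  unfold coreB
  simp only []
  have hrows : a.map (fun row => rowTransform (PySem.List.slice row none (some (PySem.List.len (a.headD [])))))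
      = a.map (rowA (a.headD []).length) := by
    apply List.map_congr_left
    intro row _
    exact (core_row_eq (a.headD []).length row).symm
  rw [hrows]
  cases hr : a.map (rowA (a.headD []).length) with
  | nil => simp
  | cons r0 rs =>
    have hw : (PySem.List.max? ((r0 :: rs).map PySem.List.len) (fun x => x)).getD 0
        = ((r0 :: rs).map PySem.List.len).foldl max 0 := by
      rw [List.map_cons, PySem.List.max?_id_cons, Option.getD_some, List.foldl_cons,
        max_eq_right (show (0 : Int) ≤ PySem.List.len r0 by simp [PySem.List.len])]
    rw [hw]
    apply List.map_congr_left
    intro row _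
    by_cases hlt : PySem.List.len row < ((r0 :: rs).map PySem.List.len).foldl max 0
    · rw [if_pos hlt]
    · rw [if_neg hlt]
      rw [PySem.List.pyRepeat_singleton,
        show (((r0 :: rs).map PySem.List.len).foldl max 0 - PySem.List.len row).toNat = 0 from by omega,
        List.replicate_zero, List.append_nil]

theorem equal_aux (arr : List (List Int)) (method : String) :
    make_new_arr arr method = make_new_arr_alt arr method := by
  have hA : make_new_arr arr method =
      (if method = "C" then
        pyZipT (coreA (if method = "C" then pyZipT arr else arr))
      else coreA (if method = "C" then pyZipT arr else arr)) := rfl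
  have hB : make_new_arr_alt arr method =
      (if method = "C" then
        pyZipT (coreB (if method = "C" then pyZipT arr else arr))
      else coreB (if method = "C" then pyZipT arr else arr)) := rfl
  rw [hA, hB, core_eq]

-- ===== VERDICT (by name: the statement is the Claim_ definition above) =====
theorem make_new_arr_spec : Claim_equal_make_new_arr := by
  intro arr method _ _
  unfold Spec_make_new_arr
  exact equal_aux arr method
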